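-- pv_equiv track=rewrite | github.com/saint0x/agent-test | agents/code_quality_agent.py | should_analyze_file
-- ===== SOURCE A (Python) =====
-- import fnmatch
--
-- def should_analyze_file(file_path):
--     """
--     Determine if a file should be analyzed based on its extension and name.
--     """
--     patterns_to_analyze = [
--         '*.py', '*.js', '*.ts', '*.php', '*.rb', '*.java', '*.go', '*.cs',  # Backend code
--         '*.html', '*.css', '*.scss', '*.jsx', '*.tsx',  # Frontend code
--         '*.sql',  # Database scripts
--         'Dockerfile', 'docker-compose.yml',  # Docker files
--         '*.xml', '*.json',  # Configuration files
--         '*.md', '*.txt'  # Documentation files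
--     ]
--
--     return any(fnmatch.fnmatch(file_path, pattern) for pattern in patterns_to_analyze)
-- ===== SOURCE B (Python) =====
-- _EXT_SUFFIXES = ('.py', '.js', '.ts', '.php', '.rb', '.java', '.go', '.cs',
--                  '.html', '.css', '.scss', '.jsx', '.tsx', '.sql',
--                  '.xml', '.json', '.md', '.txt')
-- _LITERAL_NAMES = {'Dockerfile', 'docker-compose.yml'}
--
-- def should_analyze_file(file_path):
--     return file_path.endswith(_EXT_SUFFIXES) or file_path in _LITERAL_NAMES
-- ===== Notes on version B (the rewrite author's own statement) =====
-- stated objective: idiomatic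
-- what changed: A runs a glob matcher (fnmatch) over every pattern on each call; B partitions the fixed patterns once into extension suffixes and literal file names and answers with a single endswith over the suffix tuple plus a set membership test, with no pattern matching at all.
import Mathlib
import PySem

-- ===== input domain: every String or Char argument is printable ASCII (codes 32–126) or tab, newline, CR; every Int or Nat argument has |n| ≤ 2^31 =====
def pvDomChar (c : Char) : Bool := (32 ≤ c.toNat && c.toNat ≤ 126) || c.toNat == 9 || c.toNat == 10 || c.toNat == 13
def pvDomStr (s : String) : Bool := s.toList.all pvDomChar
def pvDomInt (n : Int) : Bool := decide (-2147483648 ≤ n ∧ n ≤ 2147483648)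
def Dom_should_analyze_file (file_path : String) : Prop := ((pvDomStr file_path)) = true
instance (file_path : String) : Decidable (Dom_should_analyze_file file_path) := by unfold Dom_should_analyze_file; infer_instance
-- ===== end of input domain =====

-- B replaces A's per-pattern fnmatch glob loop by one suffix test over the extension
-- suffixes plus a literal-name set (idiomatic; exact on POSIX where os.path.normcase = id).

-- ===== PORT A =====
-- Hand port of fnmatch.fnmatch, exact for patterns built from '*' and literal
-- characters (exactly the patterns A uses: no '?', '[' or ']'); on POSIX
-- os.path.normcase is the identity, so fnmatch is plain glob matching of the whole string.
def pvFnmatch : List Char → List Char → Bool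
  | [], [] => true
  | [], _ :: _ => false
  | c :: ps, [] => c == '*' && pvFnmatch ps []
  | c :: ps, x :: t =>
      if c == '*' then pvFnmatch ps (x :: t) || pvFnmatch (c :: ps) t
      else (c == x) && pvFnmatch ps t
termination_by p s => p.length + s.length

def should_analyze_file (file_path : String) : Bool :=
  ["*.py", "*.js", "*.ts", "*.php", "*.rb", "*.java", "*.go", "*.cs",
   "*.html", "*.css", "*.scss", "*.jsx", "*.tsx",
   "*.sql",
   "Dockerfile", "docker-compose.yml",
   "*.xml", "*.json",
   "*.md", "*.txt"].any (fun pattern => pvFnmatch pattern.toList file_path.toList)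

-- ===== PORT B =====
def pvExtSuffixes : List String :=
  [".py", ".js", ".ts", ".php", ".rb", ".java", ".go", ".cs",
   ".html", ".css", ".scss", ".jsx", ".tsx", ".sql",
   ".xml", ".json", ".md", ".txt"]

def pvLiteralNames : PySem.Set String := PySem.Set.ofList ["Dockerfile", "docker-compose.yml"]

def should_analyze_file_alt (file_path : String) : Bool :=
  pvExtSuffixes.any (fun suf => PySem.Str.endswith file_path suf) ||
    PySem.Set.contains pvLiteralNames file_path

-- ===== PRECONDITION & SPEC =====
def Spec_should_analyze_file (file_path : String) (out : Bool) : Prop := out = should_analyze_file_alt file_path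
instance (file_path : String) (out : Bool) : Decidable (Spec_should_analyze_file file_path out) := by unfold Spec_should_analyze_file; infer_instance

-- ===== CLAIM (what is proved, stated in full; the proofs are below) =====
def Claim_equal_should_analyze_file : Prop := ∀ (file_path : String), Dom_should_analyze_file file_path → Spec_should_analyze_file file_path (should_analyze_file file_path)

-- ===== LEMMAS AND PROOFS =====

-- a star-free pattern matches exactly itself
theorem pvFnmatch_nostar (p : List Char) (h : '*' ∉ p) (s : List Char) :
    pvFnmatch p s = decide (s = p) := by
  induction p generalizing s with
  | nil => cases s <;> simp [pvFnmatch]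
  | cons c ps ih =>
    have hc : c ≠ '*' := fun hc => h (hc ▸ List.mem_cons_self)
    have hps : '*' ∉ ps := fun hm => h (List.mem_cons_of_mem _ hm)
    cases s with
    | nil => simp [pvFnmatch, hc]
    | cons x t =>
      have hcf : (c == '*') = false := by
        cases hb : (c == '*') with
        | false => rfl
        | true => exact absurd (by exact beq_iff_eq.mp hb) hc
      simp only [pvFnmatch, hcf, Bool.false_eq_true, ite_false]
      rw [ih hps t, Bool.eq_iff_iff]
      simp only [Bool.and_eq_true, beq_iff_eq, decide_eq_true_eq, List.cons.injEq]
      constructor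
      · rintro ⟨h1, h2⟩; exact ⟨h1.symm, h2⟩
      · rintro ⟨h1, h2⟩; exact ⟨h1.symm, h2⟩

-- '*' followed by a star-free pattern matches exactly the suffixes
theorem pvFnmatch_star (p : List Char) (h : '*' ∉ p) (s : List Char) :
    pvFnmatch ('*' :: p) s = true ↔ p <:+ s := by
  induction s with
  | nil =>
    simp [pvFnmatch, pvFnmatch_nostar p h, List.suffix_nil, eq_comm]
  | cons x t ih =>
    simp only [pvFnmatch]
    rw [if_pos (by rfl), List.suffix_cons_iff]
    simp only [Bool.or_eq_true, ih, pvFnmatch_nostar p h, decide_eq_true_eq]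
    constructor <;> rintro (h1 | h1)
    · exact Or.inl h1.symm
    · exact Or.inr h1
    · exact Or.inl h1.symm
    · exact Or.inr h1

theorem pvStarPat (pat ext : String) (hp : pat.toList = '*' :: ext.toList)
    (h : '*' ∉ ext.toList) (s : String) :
    pvFnmatch pat.toList s.toList = PySem.Chars.endswith s.toList ext.toList := by
  rw [hp, Bool.eq_iff_iff, pvFnmatch_star _ h, PySem.Chars.endswith_iff]

theorem pvLitPat (pat : String) (h : '*' ∉ pat.toList) (s : String) :
    pvFnmatch pat.toList s.toList = (s == pat) := by
  rw [pvFnmatch_nostar _ h, Bool.eq_iff_iff]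
  simp [String.ext_iff]

set_option maxHeartbeats 1000000 in
theorem pv_main (s : String) : should_analyze_file s = should_analyze_file_alt s := by
  unfold should_analyze_file should_analyze_file_alt pvExtSuffixes pvLiteralNames
  simp only [List.any_cons, List.any_nil, PySem.Str.endswith_eq]
  rw [pvStarPat "*.py" ".py" (by decide) (by decide) s,
      pvStarPat "*.js" ".js" (by decide) (by decide) s,
      pvStarPat "*.ts" ".ts" (by decide) (by decide) s,
      pvStarPat "*.php" ".php" (by decide) (by decide) s,
      pvStarPat "*.rb" ".rb" (by decide) (by decide) s,
      pvStarPat "*.java" ".java" (by decide) (by decide) s,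
      pvStarPat "*.go" ".go" (by decide) (by decide) s,
      pvStarPat "*.cs" ".cs" (by decide) (by decide) s,
      pvStarPat "*.html" ".html" (by decide) (by decide) s,
      pvStarPat "*.css" ".css" (by decide) (by decide) s,
      pvStarPat "*.scss" ".scss" (by decide) (by decide) s,
      pvStarPat "*.jsx" ".jsx" (by decide) (by decide) s,
      pvStarPat "*.tsx" ".tsx" (by decide) (by decide) s,
      pvStarPat "*.sql" ".sql" (by decide) (by decide) s,
      pvStarPat "*.xml" ".xml" (by decide) (by decide) s,
      pvStarPat "*.json" ".json" (by decide) (by decide) s,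
      pvStarPat "*.md" ".md" (by decide) (by decide) s,
      pvStarPat "*.txt" ".txt" (by decide) (by decide) s,
      pvLitPat "Dockerfile" (by decide) s,
      pvLitPat "docker-compose.yml" (by decide) s,
      show PySem.Set.ofList ["Dockerfile", "docker-compose.yml"] = ["Dockerfile", "docker-compose.yml"] from rfl,
      PySem.Set.contains]
  have hcon : (["Dockerfile", "docker-compose.yml"].contains s)
      = ((s == "Dockerfile") || (s == "docker-compose.yml")) := by
    rw [Bool.eq_iff_iff]; simp
  rw [hcon]
  simp only [Bool.or_false]
  ac_rfl

-- ===== VERDICT (by name: the statement is the Claim_ definition above) =====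
theorem should_analyze_file_spec : Claim_equal_should_analyze_file := by
  intro s _
  unfold Spec_should_analyze_file
  exact pv_main s
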